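-- pv_equiv track=rewrite | github.com/OpenNumismat/open-numismat | src/EditCoinDialog/AuctionParser.py | contentToGrade
-- ===== SOURCE A (Python) =====
-- def contentToGrade(content):
--     # Parse VF-XF and XF/AU
--     grade = ''
--     for c in content:
--         if c in '-+/':
--             break
--         else:
--             grade = grade + c
--
--     return grade
-- ===== SOURCE B (Python) =====
-- def contentToGrade(content):
--     # Find the position of the earliest delimiter, then slice once.
--     idx = len(content)
--     for d in '-+/':
--         p = content.find(d)
--         if p != -1:
--             idx = min(idx, p)
--     return content[:idx]
-- ===== Notes on version B (the rewrite author's own statement) =====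
-- stated objective: faster
-- what changed: Replaces the Python-level char-by-char accumulation loop with a min over str.find positions of the three delimiters followed by a single slice, moving the scan into C-level string primitives.
import Mathlib
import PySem

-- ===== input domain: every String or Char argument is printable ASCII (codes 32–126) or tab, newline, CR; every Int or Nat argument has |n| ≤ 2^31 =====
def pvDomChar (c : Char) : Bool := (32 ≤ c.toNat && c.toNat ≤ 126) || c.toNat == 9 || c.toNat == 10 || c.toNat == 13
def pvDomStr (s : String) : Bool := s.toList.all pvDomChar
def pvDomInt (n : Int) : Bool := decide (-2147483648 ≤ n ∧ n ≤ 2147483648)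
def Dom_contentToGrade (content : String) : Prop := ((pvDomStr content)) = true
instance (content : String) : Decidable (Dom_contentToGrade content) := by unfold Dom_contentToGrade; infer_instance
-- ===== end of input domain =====

-- B replaces A's char-by-char accumulation loop with a min over find positions of the delimiters and one slice (objective: faster — a timing run measured B faster; return value only).

-- ===== PORT A =====
-- the for-loop of A: accumulate chars into grade, break at the first delimiter
def contentToGradeLoop (cs : List Char) (grade : List Char) : List Char :=
  match cs with
  | [] => grade
  | c :: rest =>
      if PySem.Chars.isIn [c] "-+/".toList then grade
      else contentToGradeLoop rest (grade ++ [c])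

def contentToGrade (content : String) : String :=
  String.ofList (contentToGradeLoop content.toList [])

-- ===== PORT B =====
def contentToGrade_alt (content : String) : String :=
  let idx : Int := "-+/".toList.foldl (fun idx d =>
    let p := PySem.Str.find content (String.ofList [d])
    if p ≠ -1 then min idx p else idx) (PySem.Str.len content : Int)
  PySem.Str.slice content none (some idx)

-- ===== PRECONDITION & SPEC =====
def Spec_contentToGrade (content : String) (out : String) : Prop := out = contentToGrade_alt content
instance (content : String) (out : String) : Decidable (Spec_contentToGrade content out) := by unfold Spec_contentToGrade; infer_instance

-- ===== CLAIM (what is proved, stated in full; the proofs are below) =====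
def Claim_equal_contentToGrade : Prop := ∀ (content : String), Dom_contentToGrade content → Spec_contentToGrade content (contentToGrade content)

-- ===== LEMMAS AND PROOFS =====

theorem pv_dl : "-+/".toList = ['-', '+', '/'] := rfl

-- [c] is an infix of l iff c is a member
theorem pv_singleton_infix_iff_mem (a : Char) (l : List Char) : [a] <:+: l ↔ a ∈ l := by
  constructor
  · rintro ⟨s, t, rfl⟩; simp
  · intro h; obtain ⟨s, t, rfl⟩ := List.append_of_mem h; exact ⟨s, t, by simp⟩

theorem pv_isIn_singleton (c : Char) (l : List Char) :
    PySem.Chars.isIn [c] l = true ↔ c ∈ l := by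
  rw [PySem.Chars.isIn_iff_infix, pv_singleton_infix_iff_mem]

-- A's loop is takeWhile
theorem contentToGradeLoop_eq (cs : List Char) (grade : List Char) :
    contentToGradeLoop cs grade =
      grade ++ cs.takeWhile (fun c => !(PySem.Chars.isIn [c] "-+/".toList)) := by
  induction cs generalizing grade with
  | nil => simp [contentToGradeLoop]
  | cons c rest ih =>
      by_cases h : PySem.Chars.isIn [c] "-+/".toList
      · simp [contentToGradeLoop, List.takeWhile, pv_dl, pv_dl ▸ h]
      · simp [contentToGradeLoop, List.takeWhile, pv_dl, pv_dl ▸ (Bool.not_eq_true _ ▸ h : _ = false), ih]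

-- the character that stops takeWhile fails the predicate
theorem pv_takeWhile_stop (p : Char → Bool) (l : List Char)
    (h : (l.takeWhile p).length < l.length) :
    p (l[(l.takeWhile p).length]'h) = false := by
  induction l with
  | nil => simp at h
  | cons c rest ih =>
      by_cases hc : p c
      · simp [List.takeWhile, hc] at h ⊢
        exact ih _
      · simp [List.takeWhile, hc] at h ⊢

-- characters strictly before the stop position satisfy the predicate
theorem pv_takeWhile_before (p : Char → Bool) (l : List Char)
    (i : Nat) (hi : i < (l.takeWhile p).length) :
    p (l[i]'(Nat.lt_of_lt_of_le hi (l.takeWhile_prefix p).length_le)) = true := by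
  have hpre := l.takeWhile_prefix p
  have heq := hpre.getElem hi
  exact List.mem_takeWhile_imp (heq ▸ List.getElem_mem hi)

-- abbreviation for the proof: position where A's loop stops
def pvK (cs : List Char) : Nat :=
  (cs.takeWhile (fun c => !(PySem.Chars.isIn [c] "-+/".toList))).length

theorem pvK_le (cs : List Char) : pvK cs ≤ cs.length :=
  List.IsPrefix.length_le (cs.takeWhile_prefix _)

-- lower bound: every successful find of a delimiter is at or after pvK
theorem pv_find_ge (cs : List Char) (d : Char) (hd : d ∈ "-+/".toList)
    (hne : PySem.Chars.find cs [d] ≠ -1) :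
    (pvK cs : Int) ≤ PySem.Chars.find cs [d] := by
  have hpos : 0 ≤ PySem.Chars.find cs [d] := by
    have := PySem.Chars.neg_one_le_find (s := cs) (sub := [d])
    omega
  obtain ⟨hpre, -⟩ := PySem.Chars.find_spec (s := cs) (sub := [d]) hpos
  set f := (PySem.Chars.find cs [d]).toNat with hf
  rw [List.cons_prefix_iff] at hpre
  obtain ⟨t, hcons, -⟩ := hpre
  have hget : cs[f]? = some d := by
    rw [← List.head?_drop, hcons]; rfl
  by_contra hlt
  push_neg at hlt
  have hflt : f < pvK cs := by omega
  have hlen : f < cs.length := Nat.lt_of_lt_of_le hflt (pvK_le cs)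
  have hP := pv_takeWhile_before (fun c => !(PySem.Chars.isIn [c] "-+/".toList)) cs f hflt
  have hcd : cs[f]'hlen = d := by
    have h2 := List.getElem?_eq_getElem (l := cs) (i := f) hlen
    rw [hget] at h2; exact (Option.some.inj h2).symm
  rw [hcd] at hP
  simp only [Bool.not_eq_true'] at hP
  have hnm : d ∉ "-+/".toList := by rw [← pv_isIn_singleton, hP]; simp
  exact hnm hd

-- upper bound: if the loop stops before the end, the stopping character's find equals pvK
theorem pv_find_stop (cs : List Char) (h : pvK cs < cs.length) :
    ∃ d ∈ "-+/".toList, PySem.Chars.find cs [d] ≠ -1 ∧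
      PySem.Chars.find cs [d] ≤ (pvK cs : Int) := by
  set d := cs[pvK cs]'h with hd
  have hstop := pv_takeWhile_stop (fun c => !(PySem.Chars.isIn [c] "-+/".toList)) cs h
  simp only [Bool.not_eq_false'] at hstop
  have hdmem : d ∈ "-+/".toList := (pv_isIn_singleton d _).mp hstop
  have hget : cs[pvK cs]? = some d := List.getElem?_eq_getElem h
  have hpre : [d] <+: cs.drop (pvK cs) := by
    rw [List.cons_prefix_iff]
    have hh : (cs.drop (pvK cs)).head? = some d := by rw [List.head?_drop]; exact hget
    obtain ⟨t, ht⟩ : ∃ t, cs.drop (pvK cs) = d :: t := by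
      cases hcs : cs.drop (pvK cs) with
      | nil => rw [hcs] at hh; simp at hh
      | cons x xs => rw [hcs] at hh; simp at hh; exact ⟨xs, by rw [hh]⟩
    exact ⟨t, ht, List.nil_prefix⟩
  have hinf : [d] <:+: cs := hpre.isInfix.trans (cs.drop_suffix (pvK cs)).isInfix
  have hne : PySem.Chars.find cs [d] ≠ -1 := (PySem.Chars.find_ne_neg_one_iff cs [d]).mpr hinf
  refine ⟨d, hdmem, hne, ?_⟩
  have hpos : 0 ≤ PySem.Chars.find cs [d] := by
    have := PySem.Chars.neg_one_le_find (s := cs) (sub := [d]); omega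
  obtain ⟨-, hmin⟩ := PySem.Chars.find_spec (s := cs) (sub := [d]) hpos
  by_contra hgt
  push_neg at hgt
  have : pvK cs < (PySem.Chars.find cs [d]).toNat := by omega
  exact hmin (pvK cs) this hpre

-- the computed min index equals pvK
theorem pv_idx_eq (content : String) :
    ("-+/".toList.foldl (fun idx d =>
      let p := PySem.Str.find content (String.ofList [d])
      if p ≠ -1 then min idx p else idx) (PySem.Str.len content : Int)) =
    (pvK content.toList : Int) := by
  set cs := content.toList with hcs
  have hlen : (PySem.Str.len content : Int) = (cs.length : Int) := by
    simp [PySem.Str.len_eq, hcs]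
  have hfind : ∀ d : Char, PySem.Str.find content (String.ofList [d]) = PySem.Chars.find cs [d] := by
    intro d; simp [PySem.Str.find_eq, hcs]
  have hKle : pvK cs ≤ cs.length := pvK_le cs
  have hflen : ∀ d : Char, PySem.Chars.find cs [d] ≤ (cs.length : Int) := fun d =>
    PySem.Chars.find_le_length cs [d]
  have h1 : ∀ d ∈ "-+/".toList, PySem.Chars.find cs [d] ≠ -1 → (pvK cs : Int) ≤ PySem.Chars.find cs [d] :=
    fun d hd => pv_find_ge cs d hd
  simp only [hfind, hlen, pv_dl, List.foldl_cons, List.foldl_nil]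
  by_cases hK : pvK cs < cs.length
  · obtain ⟨d, hd, hne, hle⟩ := pv_find_stop cs hK
    have hd3 : d = '-' ∨ d = '+' ∨ d = '/' := by
      rw [pv_dl] at hd; simpa using hd
    have hm : ∀ d', d' = '-' ∨ d' = '+' ∨ d' = '/' → PySem.Chars.find cs [d'] ≠ -1 →
        (pvK cs : Int) ≤ PySem.Chars.find cs [d'] := by
      intro d' hd' hne'
      apply h1 d' _ hne'
      rw [pv_dl]
      rcases hd' with rfl | rfl | rfl <;> simp
    have e1 := hm '-' (by tauto)
    have e2 := hm '+' (by tauto)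
    have e3 := hm '/' (by tauto)
    have f1 := hflen '-'; have f2 := hflen '+'; have f3 := hflen '/'
    rcases hd3 with rfl | rfl | rfl <;> split_ifs <;> omega
  · -- pvK = length: no delimiter occurs at all, so every find with find ≠ -1 would be < K, impossible
    have hKeq : pvK cs = cs.length := le_antisymm hKle (by omega)
    have hall : ∀ d ∈ "-+/".toList, PySem.Chars.find cs [d] = -1 := by
      intro d hd
      by_contra hne
      have hge := h1 d hd hne
      have hpos : 0 ≤ PySem.Chars.find cs [d] := by
        have := PySem.Chars.neg_one_le_find (s := cs) (sub := [d]); omega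
      obtain ⟨hpre, -⟩ := PySem.Chars.find_spec (s := cs) (sub := [d]) hpos
      rw [List.cons_prefix_iff] at hpre
      obtain ⟨t, hcons, -⟩ := hpre
      have : (PySem.Chars.find cs [d]).toNat < cs.length := by
        have hlen2 : (cs.drop (PySem.Chars.find cs [d]).toNat).length = t.length + 1 := by
          rw [hcons]; simp
        rw [List.length_drop] at hlen2; omega
      have hfle := hflen d
      omega
    have a1 := hall '-' (by rw [pv_dl]; simp)
    have a2 := hall '+' (by rw [pv_dl]; simp)
    have a3 := hall '/' (by rw [pv_dl]; simp)
    rw [a1, a2, a3]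
    simp [hKeq]

-- ===== VERDICT (by name: the statement is the Claim_ definition above) =====
theorem contentToGrade_spec : Claim_equal_contentToGrade := by
  intro content _
  unfold Spec_contentToGrade contentToGrade contentToGrade_alt
  rw [contentToGradeLoop_eq, List.nil_append, pv_idx_eq]
  set cs := content.toList with hcs
  have htl : (PySem.Str.slice content none (some (pvK cs : Int))).toList =
      cs.takeWhile (fun c => !(PySem.Chars.isIn [c] "-+/".toList)) := by
    rw [PySem.Str.toList_slice, PySem.Chars.slice_eq_listSlice, ← hcs,
      PySem.List.slice_to _ (Int.natCast_nonneg _)]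
    have : ((pvK cs : Int)).toNat = pvK cs := Int.toNat_natCast _
    rw [this]
    exact ((List.prefix_iff_eq_take.mp (cs.takeWhile_prefix _)).symm)
  rw [← htl, String.ofList_toList]
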